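-- pv_equiv track=rewrite | github.com/MohamedBasueny/Algoexpert-problems | Class_photos.py | classPhotos
-- ===== SOURCE A (Python) =====
-- def classPhotos(redShirtHeights, blueShirtHeights):
--     #choose the red and blue teams   #O(nlogn)
--     max_1 = max(redShirtHeights)
--     max_2 = max(blueShirtHeights)
--     if max_1 == max_2 : return False
--
--     elif max_1 > max_2 :
--         taller = redShirtHeights
--         shorter = blueShirtHeights
--
--     else :
--         taller = blueShirtHeights
--         shorter = redShirtHeights
--     #by sorting we make sure that evey pair can be coupled together
--     taller.sort()
--     shorter.sort()
--     for i,j in zip(taller,shorter) :  #O(nlogn) + o(n)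
--         if i <= j : return False
--
--     return True
-- ===== SOURCE B (Python) =====
-- def classPhotos(redShirtHeights, blueShirtHeights):
--     # Selection-style check: no sorting at all. Repeatedly extract the minimum
--     # of each group (from working copies; the arguments are NOT mutated, unlike
--     # A, which sorts them in place) and require strict dominance pair by pair.
--     # This pairs the i-th smallest of each group, exactly what A's
--     # sort-ascending + zip loop compares, truncating when either group empties.
--     max_r = max(redShirtHeights)
--     max_b = max(blueShirtHeights)
--     if max_r == max_b:
--         return False
--     if max_r > max_b:
--         taller, shorter = list(redShirtHeights), list(blueShirtHeights)
--     else: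
--         taller, shorter = list(blueShirtHeights), list(redShirtHeights)
--     while taller and shorter:
--         a = min(taller)
--         b = min(shorter)
--         if a <= b:
--             return False
--         taller.remove(a)
--         shorter.remove(b)
--     return True
-- ===== Notes on version B (the rewrite author's own statement) =====
-- stated objective: alternative
-- what changed: B never sorts: it keeps the max guard, then runs a selection loop that repeatedly extracts the minimum of each group and requires strict dominance, stopping when either group empties (A instead sorts both lists and scans zip pairs); it trades A's O(n log n) sorts for an O(n^2) selection loop that needs no sorting, and does not mutate its arguments.
import Mathlib
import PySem

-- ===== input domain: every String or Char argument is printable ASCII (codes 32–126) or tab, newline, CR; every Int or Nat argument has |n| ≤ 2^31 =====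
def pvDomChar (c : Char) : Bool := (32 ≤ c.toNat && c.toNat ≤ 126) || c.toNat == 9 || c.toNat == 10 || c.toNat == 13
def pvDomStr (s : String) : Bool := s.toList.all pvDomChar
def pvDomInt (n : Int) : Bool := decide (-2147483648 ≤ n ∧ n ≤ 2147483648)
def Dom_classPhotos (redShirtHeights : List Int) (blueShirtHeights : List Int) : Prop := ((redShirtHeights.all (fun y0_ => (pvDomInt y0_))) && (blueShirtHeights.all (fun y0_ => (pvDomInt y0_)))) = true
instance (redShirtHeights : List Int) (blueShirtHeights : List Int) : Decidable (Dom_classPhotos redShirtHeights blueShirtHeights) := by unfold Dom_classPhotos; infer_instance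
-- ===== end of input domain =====

-- B replaces A's sort-both-lists-and-scan-zip algorithm by a sort-free selection loop that
-- repeatedly extracts the minimum of each group and requires strict dominance (objective:
-- alternative). A sorts both argument lists in place; B does not mutate its arguments —
-- the equivalence proved here is about the RETURN value only.


-- ===== PORT A =====
-- A's for-loop over zip(taller, shorter): return False on the first pair with i <= j, else True.
def pvLoopA : List (Int × Int) → Bool
  | [] => true
  | (i, j) :: rest => if i ≤ j then false else pvLoopA rest

def classPhotos (redShirtHeights : List Int) (blueShirtHeights : List Int) : Bool :=
  match PySem.List.max? redShirtHeights (fun x => x),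
        PySem.List.max? blueShirtHeights (fun x => x) with
  | some max1, some max2 =>
    if max1 == max2 then false
    else
      let (taller, shorter) :=
        if max1 > max2 then (redShirtHeights, blueShirtHeights)
        else (blueShirtHeights, redShirtHeights)
      let t := PySem.List.sorted taller (fun x => x)
      let s := PySem.List.sorted shorter (fun x => x)
      pvLoopA (t.zip s)
  | _, _ => false  -- max() raises ValueError on an empty list; excluded by Pre_classPhotos

-- ===== PORT B =====
-- B's while-loop: while both groups nonempty, extract min of each, require strict dominance.
def pvLoopB (taller shorter : List Int) : Bool :=
  if taller.isEmpty || shorter.isEmpty then true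
  else
    match PySem.List.min? taller (fun x => x) with
    | none => false  -- unreachable: min() of a nonempty list always returns
    | some a =>
      match PySem.List.min? shorter (fun x => x) with
      | none => false  -- unreachable: min() of a nonempty list always returns
      | some b =>
        if a ≤ b then false
        else
          match h3 : PySem.List.remove? taller a with
          | none => false  -- unreachable: list.remove of the min always succeeds
          | some t' =>
            match PySem.List.remove? shorter b with
            | none => false  -- unreachable: list.remove of the min always succeeds
            | some s' => pvLoopB t' s'
termination_by taller.length
decreasing_by
  have hmem : a ∈ taller := by
    by_contra hna
    rw [(PySem.List.remove?_eq_none_iff taller a).mpr hna] at h3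
    simp at h3
  have h4 : some (taller.erase a) = some t' :=
    (PySem.List.remove?_eq_some_erase taller a hmem).symm.trans h3
  cases h4
  have h5 := List.length_erase_of_mem hmem
  have h6 : 0 < taller.length := List.length_pos_of_mem hmem
  omega

def classPhotos_alt (redShirtHeights : List Int) (blueShirtHeights : List Int) : Bool :=
  match PySem.List.max? redShirtHeights (fun x => x) with
  | none => false  -- max() raises ValueError on an empty list; excluded by Pre_classPhotos
  | some maxR =>
    match PySem.List.max? blueShirtHeights (fun x => x) with
    | none => false  -- max() raises ValueError on an empty list; excluded by Pre_classPhotos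
    | some maxB =>
      if maxR == maxB then false
      else if maxR > maxB then pvLoopB redShirtHeights blueShirtHeights
      else pvLoopB blueShirtHeights redShirtHeights

-- ===== PRECONDITION & SPEC =====
-- Pre_ excludes exactly the inputs where Python A raises: max() raises ValueError on an empty list.
def Pre_classPhotos (redShirtHeights : List Int) (blueShirtHeights : List Int) : Prop :=
  redShirtHeights ≠ [] ∧ blueShirtHeights ≠ []
instance (redShirtHeights : List Int) (blueShirtHeights : List Int) : Decidable (Pre_classPhotos redShirtHeights blueShirtHeights) := by unfold Pre_classPhotos; infer_instance
def pvWitness_classPhotos : List Int × List Int := ([5, 8, 1], [6, 9, 2])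

def Spec_classPhotos (redShirtHeights : List Int) (blueShirtHeights : List Int) (out : Bool) : Prop := out = classPhotos_alt redShirtHeights blueShirtHeights
instance (redShirtHeights : List Int) (blueShirtHeights : List Int) (out : Bool) : Decidable (Spec_classPhotos redShirtHeights blueShirtHeights out) := by unfold Spec_classPhotos; infer_instance

-- ===== CLAIM (what is proved, stated in full; the proofs are below) =====
def Claim_equal_classPhotos : Prop := ∀ (redShirtHeights : List Int) (blueShirtHeights : List Int), Dom_classPhotos redShirtHeights blueShirtHeights → Pre_classPhotos redShirtHeights blueShirtHeights → Spec_classPhotos redShirtHeights blueShirtHeights (classPhotos redShirtHeights blueShirtHeights)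

-- ===== LEMMAS AND PROOFS =====

-- sorting a nonempty list puts its minimum first, followed by the sort of the rest.
theorem sorted_cons_min (l : List Int) (m : Int)
    (hm : PySem.List.min? l (fun x => x) = some m) :
    PySem.List.sorted l (fun x => x) = m :: PySem.List.sorted (l.erase m) (fun x => x) := by
  have hmem : m ∈ l := PySem.List.min?_mem hm
  have hmin : ∀ y ∈ l, m ≤ y := fun y hy => PySem.List.min?_isMin hm y hy
  apply PySem.List.sorted_id_eq_of_perm_of_pairwise
  · exact ((PySem.List.sorted_perm _ _ _).cons m).trans (List.perm_cons_erase hmem).symm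
  · rw [List.pairwise_cons]
    refine ⟨fun y hy => ?_, ?_⟩
    · exact hmin y (List.mem_of_mem_erase ((PySem.List.mem_sorted _ _ _ _).mp hy))
    · exact PySem.List.sorted_pairwise _ _

-- A's scan over the zip of the two ascending sorts equals B's min-extraction loop.
theorem loopA_eq_loopB (n : ℕ) : ∀ (t s : List Int), t.length ≤ n →
    pvLoopA ((PySem.List.sorted t (fun x => x)).zip (PySem.List.sorted s (fun x => x)))
      = pvLoopB t s := by
  induction n with
  | zero =>
    intro t s ht
    have : t = [] := List.length_eq_zero_iff.mp (Nat.le_zero.mp ht)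
    subst this
    rw [pvLoopB.eq_def]
    simp [PySem.List.sorted, pvLoopA]
  | succ n ih =>
    intro t s ht
    by_cases hte : t = []
    · subst hte
      rw [pvLoopB.eq_def]
      simp [PySem.List.sorted, pvLoopA]
    by_cases hse : s = []
    · subst hse
      rw [pvLoopB.eq_def]
      simp [show PySem.List.sorted ([] : List Int) (fun x => x) = [] from rfl,
        List.zip_nil_right, pvLoopA]
    obtain ⟨mt, hmt⟩ : ∃ m, PySem.List.min? t (fun x => x) = some m := by
      cases hx : PySem.List.min? t (fun x => x) with
      | none => exact absurd ((PySem.List.min?_eq_none_iff _ _).mp hx) hte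
      | some m => exact ⟨m, rfl⟩
    obtain ⟨ms, hms⟩ : ∃ m, PySem.List.min? s (fun x => x) = some m := by
      cases hx : PySem.List.min? s (fun x => x) with
      | none => exact absurd ((PySem.List.min?_eq_none_iff _ _).mp hx) hse
      | some m => exact ⟨m, rfl⟩
    have hmtm : mt ∈ t := PySem.List.min?_mem hmt
    have hmsm : ms ∈ s := PySem.List.min?_mem hms
    have hif : (t.isEmpty || s.isEmpty) = false := by simp [hte, hse]
    rw [sorted_cons_min t mt hmt, sorted_cons_min s ms hms, pvLoopB.eq_def, hif]
    simp only [Bool.false_eq_true, if_false, hmt, hms, List.zip_cons_cons, pvLoopA]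
    by_cases hle : mt ≤ ms
    · simp [hle]
    · simp only [hle, if_false]
      have hlen : (t.erase mt).length ≤ n := by
        have h5 := List.length_erase_of_mem hmtm
        have h6 : 0 < t.length := List.length_pos_of_mem hmtm
        omega
      rw [PySem.List.remove?_eq_some_erase s ms hmsm]
      split
      case _ h3 =>
        exact absurd ((PySem.List.remove?_eq_some_erase t mt hmtm).symm.trans h3) (by simp)
      case _ t' h3 =>
        have e1 : t.erase mt = t' :=
          Option.some.inj ((PySem.List.remove?_eq_some_erase t mt hmtm).symm.trans h3)
        rw [← e1]
        exact ih _ _ hlen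

-- ===== VERDICT (by name: the statement is the Claim_ definition above) =====
theorem classPhotos_spec : Claim_equal_classPhotos := by
  intro red blue _ h
  obtain ⟨hr, hb⟩ := h
  obtain ⟨m1, hm1⟩ : ∃ m, PySem.List.max? red (fun x => x) = some m := by
    cases hx : PySem.List.max? red (fun x => x) with
    | none => exact absurd ((PySem.List.max?_eq_none_iff _ _).mp hx) hr
    | some m => exact ⟨m, rfl⟩
  obtain ⟨m2, hm2⟩ : ∃ m, PySem.List.max? blue (fun x => x) = some m := by
    cases hx : PySem.List.max? blue (fun x => x) with
    | none => exact absurd ((PySem.List.max?_eq_none_iff _ _).mp hx) hb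
    | some m => exact ⟨m, rfl⟩
  unfold Spec_classPhotos
  simp only [classPhotos, classPhotos_alt, hm1, hm2]
  by_cases heq : m1 = m2
  · simp [heq]
  · simp only [beq_iff_eq, heq, if_false]
    by_cases hgt : m1 > m2 <;>
      simp only [hgt, if_true, if_false] <;>
      exact loopA_eq_loopB _ _ _ (le_refl _)
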